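-- pv_equiv track=rewrite | github.com/Zeqiang-Lai/Foundation-of-nlp | assignment1/BiLSTM-CRF-Sequence-Labeling/utilities.py | tags2words
-- ===== SOURCE A (Python) =====
-- def tags2words(sentence, tags):
--     words = []
--     lo, hi = 0, 0
--
--     for i in range(len(tags)):
--         if tags[i] == 'E' or tags[i] == 'e':
--             hi = i + 1
--             words.append(sentence[lo:hi])
--             lo = i+1
--         elif tags[i] == 'S' or tags[i] == 's':
--             words.append(sentence[lo:i + 1])
--             lo = i+1
--
--     if lo < len(tags):
--         words.append(sentence[lo:len(tags)])
--
--     assert len(sentence) == len("".join(words)), "还原失败,长度不一致\n{0}\n{1}\n{2}".format(sentence, "".join(words),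
--                                                                                     "".join(tags))
--     return words
-- ===== SOURCE B (Python) =====
-- def tags2words(sentence, tags):
--     cuts = [0]
--     for i, t in enumerate(tags):
--         if t in ('E', 'e', 'S', 's'):
--             cuts.append(i + 1)
--     if cuts[-1] < len(tags):
--         cuts.append(len(tags))
--     words = [sentence[a:b] for a, b in zip(cuts, cuts[1:])]
--     assert len(sentence) == len("".join(words)), "还原失败,长度不一致\n{0}\n{1}\n{2}".format(sentence, "".join(words),
--                                                                                     "".join(tags))
--     return words
-- ===== Notes on version B (the rewrite author's own statement) =====
-- stated objective: alternative
-- what changed: B first collects all boundary cut points in one pass, then builds every word in a second pass by pairing consecutive cut points with zip and slicing, instead of A's slice-as-you-go loop with lo/hi bookkeeping.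
import Mathlib
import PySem

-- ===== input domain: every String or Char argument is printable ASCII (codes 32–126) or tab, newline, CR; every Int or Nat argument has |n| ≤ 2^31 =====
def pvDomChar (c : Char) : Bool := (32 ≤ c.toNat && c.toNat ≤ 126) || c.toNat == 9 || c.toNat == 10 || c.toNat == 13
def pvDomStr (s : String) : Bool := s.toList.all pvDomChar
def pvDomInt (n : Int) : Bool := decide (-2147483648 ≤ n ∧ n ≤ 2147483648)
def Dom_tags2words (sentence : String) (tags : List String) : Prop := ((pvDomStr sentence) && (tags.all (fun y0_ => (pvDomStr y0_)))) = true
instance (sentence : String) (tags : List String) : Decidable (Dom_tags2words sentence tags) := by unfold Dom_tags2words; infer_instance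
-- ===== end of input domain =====

-- B collects all boundary cut points in one pass and then slices between consecutive
-- cut points in a second pass, instead of A's slice-as-you-go loop (alternative decomposition,
-- same cost). Equivalence is about the return value on Pre_ (A's assert never fires there).

-- ===== PORT A =====
def tags2words (sentence : String) (tags : List String) : List String :=
  -- for i in range(len(tags)): state (words, lo, hi)
  let r := (PySem.List.pyRange 0 (tags.length : Int) 1).foldl
    (fun (st : List String × Int × Int) i =>
      let t := PySem.List.pyGetD tags i ""
      if t = "E" ∨ t = "e" then
        let hi := i + 1
        (st.1 ++ [PySem.Str.slice sentence (some st.2.1) (some hi)], i + 1, hi)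
      else if t = "S" ∨ t = "s" then
        (st.1 ++ [PySem.Str.slice sentence (some st.2.1) (some (i + 1))], i + 1, st.2.2)
      else st) ([], 0, 0)
  -- if lo < len(tags): words.append(sentence[lo:len(tags)])
  if r.2.1 < (tags.length : Int) then
    r.1 ++ [PySem.Str.slice sentence (some r.2.1) (some (tags.length : Int))]
  else r.1
  -- the assert passes on every input admitted by Pre_tags2words; inputs where it fires are excluded

-- ===== PORT B =====
def tags2words_alt (sentence : String) (tags : List String) : List String :=
  -- one pass: collect cut points
  let cuts := (PySem.List.enumerate tags 0).foldl
    (fun (cuts : List Int) p =>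
      if p.2 = "E" ∨ p.2 = "e" ∨ p.2 = "S" ∨ p.2 = "s" then cuts ++ [p.1 + 1] else cuts)
    [0]
  -- if cuts[-1] < len(tags): cuts.append(len(tags))
  let cuts := if (PySem.List.pyGet? cuts (-1)).getD 0 < (tags.length : Int)
              then cuts ++ [(tags.length : Int)] else cuts
  -- second pass: [sentence[a:b] for a, b in zip(cuts, cuts[1:])]
  (cuts.zip (PySem.List.slice cuts (some 1) none)).map
    (fun p => PySem.Str.slice sentence (some p.1) (some p.2))
  -- the assert passes on every input admitted by Pre_tags2words; inputs where it fires are excluded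

-- ===== PRECONDITION & SPEC =====
-- Pre_ excludes exactly the inputs where A's assert fires (AssertionError): the joined words
-- cover sentence[0:len(tags)], so the assert passes iff len(sentence) ≤ len(tags).
def Pre_tags2words (sentence : String) (tags : List String) : Prop :=
  sentence.toList.length ≤ tags.length
instance (sentence : String) (tags : List String) : Decidable (Pre_tags2words sentence tags) := by
  unfold Pre_tags2words; infer_instance
def pvWitness_tags2words : String × List String := ("abc", ["B", "E", "S"])

def Spec_tags2words (sentence : String) (tags : List String) (out : List String) : Prop := out = tags2words_alt sentence tags
instance (sentence : String) (tags : List String) (out : List String) : Decidable (Spec_tags2words sentence tags out) := by unfold Spec_tags2words; infer_instance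

-- ===== CLAIM (what is proved, stated in full; the proofs are below) =====
def Claim_equal_tags2words : Prop := ∀ (sentence : String) (tags : List String), Dom_tags2words sentence tags → Pre_tags2words sentence tags → Spec_tags2words sentence tags (tags2words sentence tags)

-- ===== LEMMAS AND PROOFS =====

-- the words that B's second pass produces from a cut-point list
def pvSliceWords (sentence : String) (c : List Int) : List String :=
  (c.zip c.tail).map (fun p => PySem.Str.slice sentence (some p.1) (some p.2))

theorem pvZipTailAppend (c : List Int) (a x : Int) (h : c.getLast? = some a) :
    (c ++ [x]).zip (c ++ [x]).tail = c.zip c.tail ++ [(a, x)] := by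
  induction c with
  | nil => simp at h
  | cons y ys ih =>
    cases ys with
    | nil => simp_all
    | cons z zs =>
      have := ih (by simpa using h)
      simp_all

theorem pvSliceWordsAppend (sentence : String) (c : List Int) (a x : Int)
    (h : c.getLast? = some a) :
    pvSliceWords sentence (c ++ [x])
      = pvSliceWords sentence c ++ [PySem.Str.slice sentence (some a) (some x)] := by
  simp [pvSliceWords, pvZipTailAppend c a x h]

-- loop invariant: A's running (words, lo) are the slices between B's cut points so far
-- and the last cut point collected so far
theorem pvInv (sentence : String) :
    ∀ (ts : List String) (s0 : Int) (cuts : List Int) (lo hi : Int),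
    cuts.getLast? = some lo →
    ∃ lo' hi',
      (PySem.List.enumerate ts s0).foldl
        (fun (st : List String × Int × Int) p =>
          let t := p.2
          if t = "E" ∨ t = "e" then
            let h2 := p.1 + 1
            (st.1 ++ [PySem.Str.slice sentence (some st.2.1) (some h2)], p.1 + 1, h2)
          else if t = "S" ∨ t = "s" then
            (st.1 ++ [PySem.Str.slice sentence (some st.2.1) (some (p.1 + 1))], p.1 + 1, st.2.2)
          else st) (pvSliceWords sentence cuts, lo, hi)
        = (pvSliceWords sentence
            ((PySem.List.enumerate ts s0).foldl
              (fun (cuts : List Int) p =>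
                if p.2 = "E" ∨ p.2 = "e" ∨ p.2 = "S" ∨ p.2 = "s" then cuts ++ [p.1 + 1] else cuts)
              cuts), lo', hi')
      ∧ ((PySem.List.enumerate ts s0).foldl
              (fun (cuts : List Int) p =>
                if p.2 = "E" ∨ p.2 = "e" ∨ p.2 = "S" ∨ p.2 = "s" then cuts ++ [p.1 + 1] else cuts)
              cuts).getLast? = some lo' := by
  intro ts
  induction ts with
  | nil => intro s0 cuts lo hi h; exact ⟨lo, hi, by simp, by simpa using h⟩
  | cons t ts ih =>
    intro s0 cuts lo hi h
    rw [PySem.List.enumerate_cons]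
    by_cases hE : t = "E" ∨ t = "e"
    · have hB : t = "E" ∨ t = "e" ∨ t = "S" ∨ t = "s" := by tauto
      simp only [List.foldl_cons, if_pos hE, if_pos hB]
      have := ih (s0 + 1) (cuts ++ [s0 + 1]) (s0 + 1) (s0 + 1) (by simp)
      rwa [pvSliceWordsAppend sentence cuts lo (s0 + 1) h] at this
    · by_cases hS : t = "S" ∨ t = "s"
      · have hB : t = "E" ∨ t = "e" ∨ t = "S" ∨ t = "s" := by tauto
        simp only [List.foldl_cons, if_neg hE, if_pos hS, if_pos hB]
        have := ih (s0 + 1) (cuts ++ [s0 + 1]) (s0 + 1) hi (by simp)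
        rwa [pvSliceWordsAppend sentence cuts lo (s0 + 1) h] at this
      · have hB : ¬ (t = "E" ∨ t = "e" ∨ t = "S" ∨ t = "s") := by tauto
        simp only [List.foldl_cons, if_neg hE, if_neg hS, if_neg hB]
        exact ih (s0 + 1) cuts lo hi h

-- A's for-i-in-range loop reads tags[i]; it is the same fold taken over enumerate(tags)
theorem pvAenum (sentence : String) (tags : List String) :
    (PySem.List.pyRange 0 (tags.length : Int) 1).foldl
      (fun (st : List String × Int × Int) i =>
        let t := PySem.List.pyGetD tags i ""
        if t = "E" ∨ t = "e" then
          let hi := i + 1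
          (st.1 ++ [PySem.Str.slice sentence (some st.2.1) (some hi)], i + 1, hi)
        else if t = "S" ∨ t = "s" then
          (st.1 ++ [PySem.Str.slice sentence (some st.2.1) (some (i + 1))], i + 1, st.2.2)
        else st) ([], 0, 0)
    = (PySem.List.enumerate tags 0).foldl
      (fun (st : List String × Int × Int) p =>
        let t := p.2
        if t = "E" ∨ t = "e" then
          let h2 := p.1 + 1
          (st.1 ++ [PySem.Str.slice sentence (some st.2.1) (some h2)], p.1 + 1, h2)
        else if t = "S" ∨ t = "s" then
          (st.1 ++ [PySem.Str.slice sentence (some st.2.1) (some (p.1 + 1))], p.1 + 1, st.2.2)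
        else st) ([], 0, 0) := by
  rw [PySem.List.enumerate_eq_map_pyRange tags "", List.foldl_map]
  rfl

-- ===== VERDICT (by name: the statement is the Claim_ definition above) =====
theorem tags2words_spec : Claim_equal_tags2words := by
  intro sentence tags _ _
  show tags2words sentence tags = tags2words_alt sentence tags
  simp only [tags2words, tags2words_alt]
  rw [pvAenum]
  obtain ⟨lo', hi', hfold, hlast⟩ := pvInv sentence tags 0 [0] 0 0 (by simp)
  have h0 : pvSliceWords sentence [0] = [] := by simp [pvSliceWords]
  rw [h0] at hfold
  rw [hfold]
  simp only [PySem.List.pyGet?_neg_one, hlast, Option.getD_some, PySem.List.slice_from_one]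
  split_ifs with hlt
  · exact (pvSliceWordsAppend sentence _ lo' (tags.length : Int) hlast).symm
  · rfl
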